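-- pv_equiv track=rewrite | github.com/webszilla/work-zilla | apps/backend/worksuite/dashboard/middleware.py | _semantic_limit
-- ===== SOURCE A (Python) =====
-- def _semantic_limit(key_name):
--     text = str(key_name or "").strip().lower()
--     if not text:
--         return 255
--     if any(k in text for k in ("slug",)):
--         return 80
--     if any(k in text for k in ("search", "query")):
--         return 80
--     if any(k in text for k in ("title", "name", "subject", "label", "category")):
--         return 120
--     if "email" in text:
--         return 120
--     if any(k in text for k in ("website", "url", "domain", "link")):
--         return 255
--     if any(k in text for k in ("phone", "mobile", "whatsapp", "postal", "pincode", "zip")):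
--         return 20
--     if any(k in text for k in ("price", "amount", "cost", "qty", "quantity")):
--         return 32
--     if any(k in text for k in ("state", "city", "country")):
--         return 80
--     if "address" in text:
--         return 260
--     if any(k in text for k in ("description", "message", "note", "content", "bio", "about", "highlight")):
--         return 1000
--     if any(k in text for k in ("prompt", "instruction", "template", "script")):
--         return 4000
--     if any(k in text for k in ("password", "secret", "token", "key")):
--         return 255
--     if any(k in text for k in ("image", "logo", "banner", "avatar", "base64", "file_data", "_data")):
--         return 2_000_000
--     return 255
-- ===== SOURCE B (Python) =====
-- # Text-driven matcher: instead of testing each rule's keywords against the text,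
-- # slide over the text and hash-look-up every window in a keyword->rank dict,
-- # keeping the smallest rank seen; a limits table indexed by rank gives the answer.
-- _RULES = [
--     (("slug",), 80),
--     (("search", "query"), 80),
--     (("title", "name", "subject", "label", "category"), 120),
--     (("email",), 120),
--     (("website", "url", "domain", "link"), 255),
--     (("phone", "mobile", "whatsapp", "postal", "pincode", "zip"), 20),
--     (("price", "amount", "cost", "qty", "quantity"), 32),
--     (("state", "city", "country"), 80),
--     (("address",), 260),
--     (("description", "message", "note", "content", "bio", "about", "highlight"), 1000),
--     (("prompt", "instruction", "template", "script"), 4000),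
--     (("password", "secret", "token", "key"), 255),
--     (("image", "logo", "banner", "avatar", "base64", "file_data", "_data"), 2_000_000),
-- ]
-- _KW = {k: rank for rank, (kws, _) in enumerate(_RULES) for k in kws}
-- _LENGTHS = sorted({len(k) for k in _KW})
-- _LIMITS = [limit for _, limit in _RULES] + [255]
--
--
-- def _semantic_limit(key_name):
--     text = str(key_name or "").strip().lower()
--     best = len(_RULES)
--     for i in range(len(text)):
--         for L in _LENGTHS:
--             r = _KW.get(text[i:i + L])
--             if r is not None:
--                 best = min(best, r)
--     return _LIMITS[best]
-- ===== Notes on version B (the rewrite author's own statement) =====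
-- stated objective: alternative
-- what changed: Replaces the rule-driven if-chain of substring tests with a text-driven scan: every window of the text is hash-looked-up in a precomputed keyword->rank dict, the minimum rank is kept, and a limits table indexed by rank yields the result (255 as the sentinel rank's entry).
import Mathlib
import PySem

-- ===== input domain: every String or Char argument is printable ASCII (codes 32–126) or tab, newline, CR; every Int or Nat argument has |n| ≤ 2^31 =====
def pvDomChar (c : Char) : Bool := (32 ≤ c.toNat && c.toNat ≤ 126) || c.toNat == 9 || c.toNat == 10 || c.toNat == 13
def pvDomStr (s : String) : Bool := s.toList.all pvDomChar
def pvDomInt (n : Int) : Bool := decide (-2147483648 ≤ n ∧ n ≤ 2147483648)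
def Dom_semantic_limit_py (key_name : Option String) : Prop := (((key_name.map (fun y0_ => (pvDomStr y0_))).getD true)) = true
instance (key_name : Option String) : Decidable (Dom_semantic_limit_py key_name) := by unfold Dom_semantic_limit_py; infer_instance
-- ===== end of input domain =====

-- B replaces A's rule-driven if-chain of substring searches by a text-driven scan:
-- every window of the text is looked up in a keyword->rank dict, the minimum rank is
-- kept, and a limits table indexed by rank gives the answer (objective: alternative).

-- ===== PORT A =====
def semantic_limit_py (key_name : Option String) : Int :=
  let text := PySem.Str.lower (PySem.Str.strip (key_name.getD ""))
  if text = "" then 255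
  else if ["slug"].any (fun k => PySem.Str.isIn k text) then 80
  else if ["search", "query"].any (fun k => PySem.Str.isIn k text) then 80
  else if ["title", "name", "subject", "label", "category"].any (fun k => PySem.Str.isIn k text) then 120
  else if PySem.Str.isIn "email" text then 120
  else if ["website", "url", "domain", "link"].any (fun k => PySem.Str.isIn k text) then 255
  else if ["phone", "mobile", "whatsapp", "postal", "pincode", "zip"].any (fun k => PySem.Str.isIn k text) then 20
  else if ["price", "amount", "cost", "qty", "quantity"].any (fun k => PySem.Str.isIn k text) then 32
  else if ["state", "city", "country"].any (fun k => PySem.Str.isIn k text) then 80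
  else if PySem.Str.isIn "address" text then 260
  else if ["description", "message", "note", "content", "bio", "about", "highlight"].any (fun k => PySem.Str.isIn k text) then 1000
  else if ["prompt", "instruction", "template", "script"].any (fun k => PySem.Str.isIn k text) then 4000
  else if ["password", "secret", "token", "key"].any (fun k => PySem.Str.isIn k text) then 255
  else if ["image", "logo", "banner", "avatar", "base64", "file_data", "_data"].any (fun k => PySem.Str.isIn k text) then 2000000
  else 255

-- ===== PORT B =====
-- _KW: keyword -> rank of its rule (string keys modelled as List Char)
def pvPairs : List (List Char × Int) :=
  [ ("slug".toList, 0)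
  , ("search".toList, 1), ("query".toList, 1)
  , ("title".toList, 2), ("name".toList, 2), ("subject".toList, 2), ("label".toList, 2), ("category".toList, 2)
  , ("email".toList, 3)
  , ("website".toList, 4), ("url".toList, 4), ("domain".toList, 4), ("link".toList, 4)
  , ("phone".toList, 5), ("mobile".toList, 5), ("whatsapp".toList, 5), ("postal".toList, 5), ("pincode".toList, 5), ("zip".toList, 5)
  , ("price".toList, 6), ("amount".toList, 6), ("cost".toList, 6), ("qty".toList, 6), ("quantity".toList, 6)
  , ("state".toList, 7), ("city".toList, 7), ("country".toList, 7)
  , ("address".toList, 8)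
  , ("description".toList, 9), ("message".toList, 9), ("note".toList, 9), ("content".toList, 9), ("bio".toList, 9), ("about".toList, 9), ("highlight".toList, 9)
  , ("prompt".toList, 10), ("instruction".toList, 10), ("template".toList, 10), ("script".toList, 10)
  , ("password".toList, 11), ("secret".toList, 11), ("token".toList, 11), ("key".toList, 11)
  , ("image".toList, 12), ("logo".toList, 12), ("banner".toList, 12), ("avatar".toList, 12), ("base64".toList, 12), ("file_data".toList, 12), ("_data".toList, 12) ]

def pvKW : PySem.Dict (List Char) Int := PySem.Dict.mk pvPairs

-- _LENGTHS: the distinct keyword lengths, sorted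
def pvLengths : List Int := [3, 4, 5, 6, 7, 8, 9, 11]

-- _LIMITS: limit per rank, plus the 255 default at the sentinel rank 13
def pvLimits : List Int := [80, 80, 120, 120, 255, 20, 32, 80, 260, 1000, 4000, 255, 2000000, 255]

def semantic_limit_py_alt (key_name : Option String) : Int :=
  let text := PySem.Str.lower (PySem.Str.strip (key_name.getD ""))
  let cs := text.toList
  let best := (PySem.List.pyRange 0 (cs.length : Int) 1).foldl
    (fun best i => pvLengths.foldl
      (fun best L =>
        match pvKW.get? (PySem.List.slice cs (some i) (some (i + L))) with
        | some r => min best r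
        | none => best) best) 13
  match PySem.List.pyGet? pvLimits best with
  | some v => v
  | none => 0   -- unreachable: 0 ≤ best ≤ 13 and pvLimits has 14 entries

-- ===== PRECONDITION & SPEC =====
def Spec_semantic_limit_py (key_name : Option String) (out : Int) : Prop := out = semantic_limit_py_alt key_name
instance (key_name : Option String) (out : Int) : Decidable (Spec_semantic_limit_py key_name out) := by unfold Spec_semantic_limit_py; infer_instance

-- ===== CLAIM (what is proved, stated in full; the proofs are below) =====
def Claim_equal_semantic_limit_py : Prop := ∀ (key_name : Option String), Dom_semantic_limit_py key_name → Spec_semantic_limit_py key_name (semantic_limit_py key_name)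

-- ===== LEMMAS AND PROOFS =====

-- the rank is a hit of B's scan over cs
def pvQ (cs : List Char) (x : Int) : Prop := ∃ kw, (kw, x) ∈ pvPairs ∧ kw <:+: cs

-- all ranks produced by B's window scan
def pvHits (cs : List Char) : List Int :=
  (PySem.List.pyRange 0 (cs.length : Int) 1).flatMap (fun i =>
    pvLengths.filterMap (fun L => pvKW.get? (PySem.List.slice cs (some i) (some (i + L)))))

theorem pv_foldl_filterMap_min (l : List Int) (f : Int → Option Int) (init : Int) :
    l.foldl (fun acc x => match f x with | some y => min acc y | none => acc) init
      = (l.filterMap f).foldl min init := by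
  induction l generalizing init with
  | nil => rfl
  | cons x t ih => cases h : f x <;> simp [h, ih]

theorem pv_hits_fold (cs : List Char) :
    (PySem.List.pyRange 0 (cs.length : Int) 1).foldl
      (fun best i => pvLengths.foldl
        (fun best L =>
          match pvKW.get? (PySem.List.slice cs (some i) (some (i + L))) with
          | some r => min best r
          | none => best) best) 13
    = (pvHits cs).foldl min 13 := by
  unfold pvHits
  generalize (13 : Int) = init
  induction (PySem.List.pyRange 0 (cs.length : Int) 1) generalizing init with
  | nil => rfl
  | cons i t ih =>
      rw [List.flatMap_cons, List.foldl_cons, List.foldl_append, ih, pv_foldl_filterMap_min]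

theorem pv_pairs_facts : ∀ p ∈ pvPairs, p.1 ≠ [] ∧ ((p.1.length : Int) ∈ pvLengths) ∧ 0 ≤ p.2 ∧ p.2 ≤ 12 := by
  decide

theorem pv_nodup : pvKW.keys.Nodup := by decide

theorem pv_mem_hits (cs : List Char) (x : Int) : x ∈ pvHits cs ↔ pvQ cs x := by
  constructor
  · intro h
    simp only [pvHits, List.mem_flatMap, List.mem_filterMap] at h
    obtain ⟨i, hi, L, hL, hget⟩ := h
    rw [PySem.List.mem_pyRange_one] at hi
    have hL0 : (0 : Int) ≤ L := by
      have : ∀ L ∈ pvLengths, (0 : Int) ≤ L := by decide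
      exact this L hL
    have hkey := (PySem.Dict.get?_eq_some_iff_mem_items pvKW _ x pv_nodup).mp hget
    refine ⟨_, hkey, ?_⟩
    rw [PySem.List.slice_toNat cs hi.1 (by omega)]
    exact ((cs.drop _).take_prefix _).isInfix.trans (cs.drop_suffix _).isInfix
  · rintro ⟨kw, hkm, hinf⟩
    obtain ⟨hne, hlen, -, -⟩ := pv_pairs_facts (kw, x) hkm
    obtain ⟨t, hpre, hsuf⟩ := List.infix_iff_prefix_suffix.mp hinf
    have ht : t = cs.drop (cs.length - t.length) := List.suffix_iff_eq_drop.mp hsuf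
    have htne : t ≠ [] := fun h => hne (List.prefix_nil.mp (h ▸ hpre))
    have hj : cs.length - t.length < cs.length := by
      have h1 : 0 < t.length := List.length_pos_iff.mpr htne
      have h2 : t.length ≤ cs.length := hsuf.length_le
      omega
    simp only [pvHits, List.mem_flatMap, List.mem_filterMap]
    refine ⟨((cs.length - t.length : Nat) : Int), ?_, (kw.length : Int), hlen, ?_⟩
    · exact PySem.List.mem_pyRange_one.mpr ⟨by positivity, by exact_mod_cast hj⟩
    · have hslice : PySem.List.slice cs (some ((cs.length - t.length : Nat) : Int))
          (some (((cs.length - t.length : Nat) : Int) + (kw.length : Int))) = kw := by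
        rw [PySem.List.slice_natCast_add, ← ht]
        exact (List.prefix_iff_eq_take.mp hpre).symm
      rw [hslice]
      exact (PySem.Dict.get?_eq_some_iff_mem_items pvKW kw x pv_nodup).mpr hkm

theorem pvQ_iff (cs : List Char) (x : Int) (kws : List (List Char))
    (hk : (pvPairs.filter (fun p => p.2 == x)).map Prod.fst = kws) :
    pvQ cs x ↔ ∃ kw ∈ kws, kw <:+: cs := by
  subst hk
  constructor
  · rintro ⟨kw, hm, hi⟩
    exact ⟨kw, List.mem_map.mpr ⟨(kw, x), List.mem_filter.mpr ⟨hm, by simp⟩, rfl⟩, hi⟩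
  · rintro ⟨kw, hm, hi⟩
    obtain ⟨p, hp, rfl⟩ := List.mem_map.mp hm
    obtain ⟨hp1, hp2⟩ := List.mem_filter.mp hp
    have hx : p.2 = x := by simpa using hp2
    exact ⟨p.1, by rw [← hx]; exact hp1, hi⟩

theorem pvQ_bounds (cs : List Char) (x : Int) : pvQ cs x → 0 ≤ x ∧ x ≤ 12 := by
  rintro ⟨kw, hm, -⟩
  exact (pv_pairs_facts (kw, x) hm).2.2

theorem pv_br0 (text : String) : (["slug"].any (fun k => PySem.Str.isIn k text)) = true ↔ pvQ text.toList 0 := by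
  rw [pvQ_iff _ 0 ["slug".toList] (by decide)]
  simp [PySem.Chars.isIn_iff_infix]

theorem pv_br1 (text : String) : (["search", "query"].any (fun k => PySem.Str.isIn k text)) = true ↔ pvQ text.toList 1 := by
  rw [pvQ_iff _ 1 ["search".toList, "query".toList] (by decide)]
  simp [PySem.Chars.isIn_iff_infix]

theorem pv_br2 (text : String) : (["title", "name", "subject", "label", "category"].any (fun k => PySem.Str.isIn k text)) = true ↔ pvQ text.toList 2 := by
  rw [pvQ_iff _ 2 ["title".toList, "name".toList, "subject".toList, "label".toList, "category".toList] (by decide)]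
  simp [PySem.Chars.isIn_iff_infix]

theorem pv_br3 (text : String) : (PySem.Str.isIn "email" text) = true ↔ pvQ text.toList 3 := by
  rw [pvQ_iff _ 3 ["email".toList] (by decide)]
  simp [PySem.Chars.isIn_iff_infix]

theorem pv_br4 (text : String) : (["website", "url", "domain", "link"].any (fun k => PySem.Str.isIn k text)) = true ↔ pvQ text.toList 4 := by
  rw [pvQ_iff _ 4 ["website".toList, "url".toList, "domain".toList, "link".toList] (by decide)]
  simp [PySem.Chars.isIn_iff_infix]

theorem pv_br5 (text : String) : (["phone", "mobile", "whatsapp", "postal", "pincode", "zip"].any (fun k => PySem.Str.isIn k text)) = true ↔ pvQ text.toList 5 := by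
  rw [pvQ_iff _ 5 ["phone".toList, "mobile".toList, "whatsapp".toList, "postal".toList, "pincode".toList, "zip".toList] (by decide)]
  simp [PySem.Chars.isIn_iff_infix]

theorem pv_br6 (text : String) : (["price", "amount", "cost", "qty", "quantity"].any (fun k => PySem.Str.isIn k text)) = true ↔ pvQ text.toList 6 := by
  rw [pvQ_iff _ 6 ["price".toList, "amount".toList, "cost".toList, "qty".toList, "quantity".toList] (by decide)]
  simp [PySem.Chars.isIn_iff_infix]

theorem pv_br7 (text : String) : (["state", "city", "country"].any (fun k => PySem.Str.isIn k text)) = true ↔ pvQ text.toList 7 := by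
  rw [pvQ_iff _ 7 ["state".toList, "city".toList, "country".toList] (by decide)]
  simp [PySem.Chars.isIn_iff_infix]

theorem pv_br8 (text : String) : (PySem.Str.isIn "address" text) = true ↔ pvQ text.toList 8 := by
  rw [pvQ_iff _ 8 ["address".toList] (by decide)]
  simp [PySem.Chars.isIn_iff_infix]

theorem pv_br9 (text : String) : (["description", "message", "note", "content", "bio", "about", "highlight"].any (fun k => PySem.Str.isIn k text)) = true ↔ pvQ text.toList 9 := by
  rw [pvQ_iff _ 9 ["description".toList, "message".toList, "note".toList, "content".toList, "bio".toList, "about".toList, "highlight".toList] (by decide)]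
  simp [PySem.Chars.isIn_iff_infix]

theorem pv_br10 (text : String) : (["prompt", "instruction", "template", "script"].any (fun k => PySem.Str.isIn k text)) = true ↔ pvQ text.toList 10 := by
  rw [pvQ_iff _ 10 ["prompt".toList, "instruction".toList, "template".toList, "script".toList] (by decide)]
  simp [PySem.Chars.isIn_iff_infix]

theorem pv_br11 (text : String) : (["password", "secret", "token", "key"].any (fun k => PySem.Str.isIn k text)) = true ↔ pvQ text.toList 11 := by
  rw [pvQ_iff _ 11 ["password".toList, "secret".toList, "token".toList, "key".toList] (by decide)]
  simp [PySem.Chars.isIn_iff_infix]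

theorem pv_br12 (text : String) : (["image", "logo", "banner", "avatar", "base64", "file_data", "_data"].any (fun k => PySem.Str.isIn k text)) = true ↔ pvQ text.toList 12 := by
  rw [pvQ_iff _ 12 ["image".toList, "logo".toList, "banner".toList, "avatar".toList, "base64".toList, "file_data".toList, "_data".toList] (by decide)]
  simp [PySem.Chars.isIn_iff_infix]

-- ===== VERDICT (by name: the statement is the Claim_ definition above) =====
theorem semantic_limit_py_spec : Claim_equal_semantic_limit_py := by
  intro key_name _
  unfold Spec_semantic_limit_py semantic_limit_py semantic_limit_py_alt
  set text := PySem.Str.lower (PySem.Str.strip (key_name.getD "")) with htext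
  by_cases hE : text = ""
  · rw [hE]; decide
  · simp only [if_neg hE, pv_hits_fold]
    have hmin := PySem.List.foldl_min_le (pvHits text.toList) (13 : Int)
    have hbm := PySem.List.foldl_min_mem (pvHits text.toList) (13 : Int)
    generalize hb : List.foldl min (13 : Int) (pvHits text.toList) = b
    rw [hb] at hmin hbm
    by_cases h0 : pvQ text.toList 0
    · rw [if_pos ((pv_br0 text).mpr h0)]
      have hle : b ≤ (0 : Int) := hmin.2 _ ((pv_mem_hits text.toList 0).mpr h0)
      have hbmem : b ∈ pvHits text.toList := by
        rcases hbm with h | h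
        · exact absurd h (by omega)
        · exact h
      have hQb : pvQ text.toList b := (pv_mem_hits text.toList b).mp hbmem
      have hge : (0 : Int) ≤ b := (pvQ_bounds _ _ hQb).1
      have hbr : b = 0 := by omega
      rw [hbr]; rfl
    · rw [if_neg (fun hc => h0 ((pv_br0 text).mp hc))]
      by_cases h1 : pvQ text.toList 1
      · rw [if_pos ((pv_br1 text).mpr h1)]
        have hle : b ≤ (1 : Int) := hmin.2 _ ((pv_mem_hits text.toList 1).mpr h1)
        have hbmem : b ∈ pvHits text.toList := by
          rcases hbm with h | h
          · exact absurd h (by omega)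
          · exact h
        have hQb : pvQ text.toList b := (pv_mem_hits text.toList b).mp hbmem
        have hge : (0 : Int) ≤ b := (pvQ_bounds _ _ hQb).1
        have hbr : b = 1 := by
          interval_cases b <;> first | rfl | exact absurd hQb (by assumption)
        rw [hbr]; rfl
      · rw [if_neg (fun hc => h1 ((pv_br1 text).mp hc))]
        by_cases h2 : pvQ text.toList 2
        · rw [if_pos ((pv_br2 text).mpr h2)]
          have hle : b ≤ (2 : Int) := hmin.2 _ ((pv_mem_hits text.toList 2).mpr h2)
          have hbmem : b ∈ pvHits text.toList := by
            rcases hbm with h | h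
            · exact absurd h (by omega)
            · exact h
          have hQb : pvQ text.toList b := (pv_mem_hits text.toList b).mp hbmem
          have hge : (0 : Int) ≤ b := (pvQ_bounds _ _ hQb).1
          have hbr : b = 2 := by
            interval_cases b <;> first | rfl | exact absurd hQb (by assumption)
          rw [hbr]; rfl
        · rw [if_neg (fun hc => h2 ((pv_br2 text).mp hc))]
          by_cases h3 : pvQ text.toList 3
          · rw [if_pos ((pv_br3 text).mpr h3)]
            have hle : b ≤ (3 : Int) := hmin.2 _ ((pv_mem_hits text.toList 3).mpr h3)
            have hbmem : b ∈ pvHits text.toList := by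
              rcases hbm with h | h
              · exact absurd h (by omega)
              · exact h
            have hQb : pvQ text.toList b := (pv_mem_hits text.toList b).mp hbmem
            have hge : (0 : Int) ≤ b := (pvQ_bounds _ _ hQb).1
            have hbr : b = 3 := by
              interval_cases b <;> first | rfl | exact absurd hQb (by assumption)
            rw [hbr]; rfl
          · rw [if_neg (fun hc => h3 ((pv_br3 text).mp hc))]
            by_cases h4 : pvQ text.toList 4
            · rw [if_pos ((pv_br4 text).mpr h4)]
              have hle : b ≤ (4 : Int) := hmin.2 _ ((pv_mem_hits text.toList 4).mpr h4)
              have hbmem : b ∈ pvHits text.toList := by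
                rcases hbm with h | h
                · exact absurd h (by omega)
                · exact h
              have hQb : pvQ text.toList b := (pv_mem_hits text.toList b).mp hbmem
              have hge : (0 : Int) ≤ b := (pvQ_bounds _ _ hQb).1
              have hbr : b = 4 := by
                interval_cases b <;> first | rfl | exact absurd hQb (by assumption)
              rw [hbr]; rfl
            · rw [if_neg (fun hc => h4 ((pv_br4 text).mp hc))]
              by_cases h5 : pvQ text.toList 5
              · rw [if_pos ((pv_br5 text).mpr h5)]
                have hle : b ≤ (5 : Int) := hmin.2 _ ((pv_mem_hits text.toList 5).mpr h5)
                have hbmem : b ∈ pvHits text.toList := by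
                  rcases hbm with h | h
                  · exact absurd h (by omega)
                  · exact h
                have hQb : pvQ text.toList b := (pv_mem_hits text.toList b).mp hbmem
                have hge : (0 : Int) ≤ b := (pvQ_bounds _ _ hQb).1
                have hbr : b = 5 := by
                  interval_cases b <;> first | rfl | exact absurd hQb (by assumption)
                rw [hbr]; rfl
              · rw [if_neg (fun hc => h5 ((pv_br5 text).mp hc))]
                by_cases h6 : pvQ text.toList 6
                · rw [if_pos ((pv_br6 text).mpr h6)]
                  have hle : b ≤ (6 : Int) := hmin.2 _ ((pv_mem_hits text.toList 6).mpr h6)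
                  have hbmem : b ∈ pvHits text.toList := by
                    rcases hbm with h | h
                    · exact absurd h (by omega)
                    · exact h
                  have hQb : pvQ text.toList b := (pv_mem_hits text.toList b).mp hbmem
                  have hge : (0 : Int) ≤ b := (pvQ_bounds _ _ hQb).1
                  have hbr : b = 6 := by
                    interval_cases b <;> first | rfl | exact absurd hQb (by assumption)
                  rw [hbr]; rfl
                · rw [if_neg (fun hc => h6 ((pv_br6 text).mp hc))]
                  by_cases h7 : pvQ text.toList 7
                  · rw [if_pos ((pv_br7 text).mpr h7)]
                    have hle : b ≤ (7 : Int) := hmin.2 _ ((pv_mem_hits text.toList 7).mpr h7)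
                    have hbmem : b ∈ pvHits text.toList := by
                      rcases hbm with h | h
                      · exact absurd h (by omega)
                      · exact h
                    have hQb : pvQ text.toList b := (pv_mem_hits text.toList b).mp hbmem
                    have hge : (0 : Int) ≤ b := (pvQ_bounds _ _ hQb).1
                    have hbr : b = 7 := by
                      interval_cases b <;> first | rfl | exact absurd hQb (by assumption)
                    rw [hbr]; rfl
                  · rw [if_neg (fun hc => h7 ((pv_br7 text).mp hc))]
                    by_cases h8 : pvQ text.toList 8
                    · rw [if_pos ((pv_br8 text).mpr h8)]
                      have hle : b ≤ (8 : Int) := hmin.2 _ ((pv_mem_hits text.toList 8).mpr h8)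
                      have hbmem : b ∈ pvHits text.toList := by
                        rcases hbm with h | h
                        · exact absurd h (by omega)
                        · exact h
                      have hQb : pvQ text.toList b := (pv_mem_hits text.toList b).mp hbmem
                      have hge : (0 : Int) ≤ b := (pvQ_bounds _ _ hQb).1
                      have hbr : b = 8 := by
                        interval_cases b <;> first | rfl | exact absurd hQb (by assumption)
                      rw [hbr]; rfl
                    · rw [if_neg (fun hc => h8 ((pv_br8 text).mp hc))]
                      by_cases h9 : pvQ text.toList 9
                      · rw [if_pos ((pv_br9 text).mpr h9)]
                        have hle : b ≤ (9 : Int) := hmin.2 _ ((pv_mem_hits text.toList 9).mpr h9)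
                        have hbmem : b ∈ pvHits text.toList := by
                          rcases hbm with h | h
                          · exact absurd h (by omega)
                          · exact h
                        have hQb : pvQ text.toList b := (pv_mem_hits text.toList b).mp hbmem
                        have hge : (0 : Int) ≤ b := (pvQ_bounds _ _ hQb).1
                        have hbr : b = 9 := by
                          interval_cases b <;> first | rfl | exact absurd hQb (by assumption)
                        rw [hbr]; rfl
                      · rw [if_neg (fun hc => h9 ((pv_br9 text).mp hc))]
                        by_cases h10 : pvQ text.toList 10
                        · rw [if_pos ((pv_br10 text).mpr h10)]
                          have hle : b ≤ (10 : Int) := hmin.2 _ ((pv_mem_hits text.toList 10).mpr h10)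
                          have hbmem : b ∈ pvHits text.toList := by
                            rcases hbm with h | h
                            · exact absurd h (by omega)
                            · exact h
                          have hQb : pvQ text.toList b := (pv_mem_hits text.toList b).mp hbmem
                          have hge : (0 : Int) ≤ b := (pvQ_bounds _ _ hQb).1
                          have hbr : b = 10 := by
                            interval_cases b <;> first | rfl | exact absurd hQb (by assumption)
                          rw [hbr]; rfl
                        · rw [if_neg (fun hc => h10 ((pv_br10 text).mp hc))]
                          by_cases h11 : pvQ text.toList 11
                          · rw [if_pos ((pv_br11 text).mpr h11)]
                            have hle : b ≤ (11 : Int) := hmin.2 _ ((pv_mem_hits text.toList 11).mpr h11)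
                            have hbmem : b ∈ pvHits text.toList := by
                              rcases hbm with h | h
                              · exact absurd h (by omega)
                              · exact h
                            have hQb : pvQ text.toList b := (pv_mem_hits text.toList b).mp hbmem
                            have hge : (0 : Int) ≤ b := (pvQ_bounds _ _ hQb).1
                            have hbr : b = 11 := by
                              interval_cases b <;> first | rfl | exact absurd hQb (by assumption)
                            rw [hbr]; rfl
                          · rw [if_neg (fun hc => h11 ((pv_br11 text).mp hc))]
                            by_cases h12 : pvQ text.toList 12
                            · rw [if_pos ((pv_br12 text).mpr h12)]
                              have hle : b ≤ (12 : Int) := hmin.2 _ ((pv_mem_hits text.toList 12).mpr h12)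
                              have hbmem : b ∈ pvHits text.toList := by
                                rcases hbm with h | h
                                · exact absurd h (by omega)
                                · exact h
                              have hQb : pvQ text.toList b := (pv_mem_hits text.toList b).mp hbmem
                              have hge : (0 : Int) ≤ b := (pvQ_bounds _ _ hQb).1
                              have hbr : b = 12 := by
                                interval_cases b <;> first | rfl | exact absurd hQb (by assumption)
                              rw [hbr]; rfl
                            · rw [if_neg (fun hc => h12 ((pv_br12 text).mp hc))]
                              have hb13 : b = 13 := by
                                rcases hbm with h | h
                                · exact h
                                · have hQb : pvQ text.toList b := (pv_mem_hits text.toList b).mp h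
                                  have hbd := pvQ_bounds _ _ hQb
                                  obtain ⟨hge, hle⟩ := hbd
                                  interval_cases b <;> exact absurd hQb (by assumption)
                              rw [hb13]; rfl
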